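-- pv_equiv track=rewrite | github.com/ingenpeiling/ColingPython-p1 | HW2/B/B.py | solution
-- ===== SOURCE A (Python) =====
-- def solution(a):
--
--     hf = a.find('h')
--     hl = a.rfind('h')
--     if hf == hl:
--         no_hs = a
--     else:
--         first = a[:a.find('h', hf + 1)]
--         middle = a[a.find('h', hf + 1):hl]
--         last = a[hl:]
--         no_hs = "".join([first, middle.replace('h', 'H'), last])
--
--     no_threes = ''.join([no_hs[i] for i in range(len(no_hs)) if i == 0 or i % 3 != 0])
--
--     no_ones = no_threes.replace('1', 'one')
--
--     return no_ones
-- ===== SOURCE B (Python) =====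
-- def solution(a):
--     hf = a.find('h')
--     hl = a.rfind('h')
--     out = []
--     for i, c in enumerate(a):
--         if i != 0 and i % 3 == 0:
--             continue
--         ch = 'H' if c == 'h' and hf < i < hl else c
--         out.append('one' if ch == '1' else ch)
--     return ''.join(out)
-- ===== Notes on version B (the rewrite author's own statement) =====
-- stated objective: alternative
-- what changed: B replaces A's three separate passes (find/rfind plus slicing and middle.replace to capitalize inner h's, an index-filtering comprehension, then a whole-string '1'->'one' replace) by a single fused loop over enumerate(a) that capitalizes, filters and substitutes each character in one traversal.
import Mathlib
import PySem

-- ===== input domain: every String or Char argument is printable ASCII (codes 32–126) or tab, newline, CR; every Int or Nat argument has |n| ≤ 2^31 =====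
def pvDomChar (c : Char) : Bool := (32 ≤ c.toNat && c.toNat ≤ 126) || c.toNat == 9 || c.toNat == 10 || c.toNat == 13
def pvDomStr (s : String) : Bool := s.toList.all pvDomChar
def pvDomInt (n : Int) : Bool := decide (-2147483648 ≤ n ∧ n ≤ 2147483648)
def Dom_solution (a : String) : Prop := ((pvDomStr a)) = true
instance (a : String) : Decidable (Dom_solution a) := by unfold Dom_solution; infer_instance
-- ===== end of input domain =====

-- B fuses A's three passes (h-capitalization by slicing, index filtering, '1'->'one' replace)
-- into one loop over enumerate(a); same output, different decomposition (not claimed faster).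

-- ===== PORT A =====
def solution (a : String) : String :=
  let hf := PySem.Str.find a "h"
  let hl := PySem.Str.rfind a "h"
  let no_hs : String :=
    if hf = hl then a
    else
      let first := PySem.Str.slice a none (some (PySem.Str.findFrom a "h" (hf + 1)))
      let middle := PySem.Str.slice a (some (PySem.Str.findFrom a "h" (hf + 1))) (some hl)
      let last := PySem.Str.slice a (some hl) none
      PySem.Str.join "" [first, PySem.Str.replace middle "h" "H", last]
  -- the comprehension joins the chars no_hs[i]; i is always in range, so the default ' '
  -- of pyGetD is never used (exact)
  let no_threes : String := String.ofList
    (((PySem.List.pyRange 0 (PySem.Str.len no_hs) 1).filter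
        (fun i => i == 0 || !(PySem.Int.mod i 3 == 0))).map
      (fun i => PySem.List.pyGetD no_hs.toList i ' '))
  PySem.Str.replace no_threes "1" "one"

-- ===== PORT B =====
def solution_alt (a : String) : String :=
  let hf := PySem.Str.find a "h"
  let hl := PySem.Str.rfind a "h"
  -- the loop appends 'one' or the single kept char to out; ''.join(out) is the
  -- concatenation of the appended pieces (exact)
  String.ofList ((PySem.List.enumerate a.toList).foldl
    (fun acc (p : Int × Char) =>
      if p.1 ≠ 0 ∧ PySem.Int.mod p.1 3 = 0 then acc
      else
        let ch := if p.2 = 'h' ∧ hf < p.1 ∧ p.1 < hl then 'H' else p.2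
        acc ++ (if ch = '1' then ['o', 'n', 'e'] else [ch])) [])

-- ===== PRECONDITION & SPEC =====
def Spec_solution (a : String) (out : String) : Prop := out = solution_alt a
instance (a : String) (out : String) : Decidable (Spec_solution a out) := by unfold Spec_solution; infer_instance

-- ===== CLAIM (what is proved, stated in full; the proofs are below) =====
def Claim_equal_solution : Prop := ∀ (a : String), Dom_solution a → Spec_solution a (solution a)

-- ===== LEMMAS AND PROOFS =====

-- the per-character capitalization A's slicing performs and B applies pointwise
def capFun (hf hl : Int) (p : Int × Char) : Char :=
  if p.2 = 'h' ∧ hf < p.1 ∧ p.1 < hl then 'H' else p.2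

def onePiece (c : Char) : List Char := if c = '1' then ['o', 'n', 'e'] else [c]

theorem isPrefixOf_single_nil (c : Char) : List.isPrefixOf [c] ([] : List Char) = false := by
  simp [List.isPrefixOf]

theorem isPrefixOf_single_cons (c x : Char) (t : List Char) :
    List.isPrefixOf [c] (x :: t) = (x == c) := by
  simp only [List.isPrefixOf, Bool.and_true]
  simp [eq_comm]

theorem findgo_not (c : Char) (s : List Char) (k : Nat) (h : c ∉ s) :
    PySem.Chars.find.go [c] s k = -1 := by
  induction s generalizing k with
  | nil => rw [PySem.Chars.find.go]; simp
  | cons x t ih =>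
    rw [PySem.Chars.find.go]
    simp only [isPrefixOf_single_cons]
    have hx : x ≠ c := by intro hx; exact h (by simp [hx])
    simp only [beq_iff_eq, hx, if_false]
    exact ih _ (fun hm => h (List.mem_cons_of_mem _ hm))

theorem findgo_mem (c : Char) (u v : List Char) (k : Nat) (h : c ∉ u) :
    PySem.Chars.find.go [c] (u ++ c :: v) k = (k : Int) + u.length := by
  induction u generalizing k with
  | nil => rw [List.nil_append, PySem.Chars.find.go, isPrefixOf_single_cons]; simp
  | cons x t ih =>
    rw [List.cons_append, PySem.Chars.find.go]
    simp only [isPrefixOf_single_cons]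
    have hx : x ≠ c := by intro hx; exact h (by simp [hx])
    have := ih (k + 1) (fun hm => h (List.mem_cons_of_mem _ hm))
    simp only [hx, beq_iff_eq, if_false, this]
    push_cast
    simp only [List.length_cons]
    push_cast
    ring

theorem find_not (c : Char) (s : List Char) (h : c ∉ s) : PySem.Chars.find s [c] = -1 :=
  findgo_not c s 0 h

theorem find_mem (c : Char) (u v : List Char) (h : c ∉ u) :
    PySem.Chars.find (u ++ c :: v) [c] = u.length := by
  have := findgo_mem c u v 0 h
  simpa [PySem.Chars.find] using this

theorem drop_no_prefix (c : Char) (s : List Char) (h : c ∉ s) (j : Nat) :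
    List.isPrefixOf [c] (s.drop j) = false := by
  cases hd : s.drop j with
  | nil => exact isPrefixOf_single_nil c
  | cons x t =>
    rw [isPrefixOf_single_cons]
    have hx : x ∈ s := by
      have : x ∈ s.drop j := by rw [hd]; exact List.mem_cons_self
      exact List.mem_of_mem_drop this
    have : x ≠ c := fun hxc => h (hxc ▸ hx)
    simp [this]

theorem rfindgo_not (c : Char) (s : List Char) (h : c ∉ s) (n : Nat) :
    PySem.Chars.rfind.go s [c] n = -1 := by
  induction n with
  | zero =>
    rw [PySem.Chars.rfind.go]
    rw [show List.isPrefixOf [c] s = List.isPrefixOf [c] (s.drop 0) by simp,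
      drop_no_prefix c s h 0]
    simp
  | succ m ih =>
    rw [PySem.Chars.rfind.go]
    simp only [drop_no_prefix c s h (m + 1)]
    simpa using ih

theorem rfind_not (c : Char) (s : List Char) (h : c ∉ s) : PySem.Chars.rfind s [c] = -1 :=
  rfindgo_not c s h s.length

theorem rfindgo_mem (c : Char) (u w : List Char) (h : c ∉ w) (n : Nat)
    (h1 : u.length ≤ n) (h2 : n ≤ (u ++ c :: w).length) :
    PySem.Chars.rfind.go (u ++ c :: w) [c] n = u.length := by
  induction n with
  | zero =>
    have hu : u = [] := by
      cases u with
      | nil => rfl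
      | cons a b => simp at h1
    subst hu
    rw [PySem.Chars.rfind.go]
    simp
  | succ m ih =>
    rw [PySem.Chars.rfind.go]
    by_cases he : u.length = m + 1
    · have : (u ++ c :: w).drop (m + 1) = c :: w := by
        rw [← he]; exact List.drop_left
      rw [this, isPrefixOf_single_cons]
      simp [he]
    · have hlt : u.length ≤ m := by omega
      have hpre : List.isPrefixOf [c] ((u ++ c :: w).drop (m + 1)) = false := by
        have hm1 : (u ++ c :: w).drop (m + 1) = w.drop (m - u.length) := by
          have he1 : m + 1 = u.length + ((m - u.length) + 1) := by omega
          rw [he1, List.drop_append]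
          simp
        rw [hm1]; exact drop_no_prefix c w h _
      rw [hpre]
      simp only [Bool.false_eq_true, if_false]
      exact ih hlt (by omega)

theorem rfind_mem (c : Char) (u w : List Char) (h : c ∉ w) :
    PySem.Chars.rfind (u ++ c :: w) [c] = u.length := by
  exact rfindgo_mem c u w h _ (by simp) le_rfl

theorem exists_first (c : Char) (s : List Char) (h : c ∈ s) :
    ∃ u v, s = u ++ c :: v ∧ c ∉ u := by
  induction s with
  | nil => simp at h
  | cons x t ih =>
    by_cases hx : x = c
    · exact ⟨[], t, by simp [hx], by simp⟩
    · have : c ∈ t := by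
        rcases List.mem_cons.mp h with h1 | h1
        · exact absurd h1.symm hx
        · exact h1
      obtain ⟨u, v, rfl, hu⟩ := ih this
      refine ⟨x :: u, v, rfl, ?_⟩
      simp only [List.mem_cons]
      rintro (h1 | h1)
      · exact hx h1.symm
      · exact hu h1

theorem exists_last (c : Char) (s : List Char) (h : c ∈ s) :
    ∃ u v, s = u ++ c :: v ∧ c ∉ v := by
  obtain ⟨u, v, hrev, hu⟩ := exists_first c s.reverse (by simpa using h)
  refine ⟨v.reverse, u.reverse, ?_, by simpa using hu⟩
  have := congrArg List.reverse hrev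
  simpa using this

theorem replacego_single (c : Char) (nw : List Char) (l acc : List Char) (fuel : Nat)
    (h : l.length ≤ fuel) :
    PySem.Chars.replace.go [c] nw fuel l acc =
      acc.reverse ++ l.flatMap (fun x => if x = c then nw else [x]) := by
  induction l generalizing fuel acc with
  | nil =>
    cases fuel with
    | zero => rw [PySem.Chars.replace.go]; simp
    | succ m =>
      rw [PySem.Chars.replace.go]
      all_goals simp
  | cons x t ih =>
    cases fuel with
    | zero => simp at h
    | succ m =>
      rw [PySem.Chars.replace.go]
      simp only [isPrefixOf_single_cons]
      by_cases hx : x = c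
      · simp only [hx, beq_self_eq_true, if_true, List.length_cons, List.length_nil,
          List.drop_succ_cons, List.drop_zero]
        rw [ih _ _ (by simpa using Nat.le_of_succ_le_succ h)]
        simp [hx]
      · simp only [beq_iff_eq, hx, if_false]
        rw [ih _ _ (by simpa using Nat.le_of_succ_le_succ h)]
        simp [hx]

theorem replace_single (c : Char) (nw : List Char) (l : List Char) :
    PySem.Chars.replace l [c] nw = l.flatMap (fun x => if x = c then nw else [x]) := by
  rw [PySem.Chars.replace]
  simp only [List.isEmpty_cons, Bool.false_eq_true, if_false]
  simpa using replacego_single c nw l [] l.length le_rfl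

theorem cap_map_id (hf hl s : Int) (seg : List Char)
    (h : ∀ (k : Nat) (hk : k < seg.length),
      seg[k] = 'h' → ¬(hf < s + (k : Int) ∧ s + (k : Int) < hl)) :
    (PySem.List.enumerate seg s).map (capFun hf hl) = seg := by
  have hcong : ∀ p ∈ PySem.List.enumerate seg s, capFun hf hl p = p.2 := by
    intro p hp
    rw [PySem.List.mem_enumerate_iff] at hp
    obtain ⟨k, hk, rfl⟩ := hp
    simp only [capFun]
    split
    · rename_i hc
      exact absurd ⟨hc.2.1, hc.2.2⟩ (h k hk hc.1)
    · rfl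
  rw [List.map_congr_left hcong, PySem.List.map_snd_enumerate]

theorem cap_map_all (hf hl s : Int) (seg : List Char)
    (h : ∀ (k : Nat), k < seg.length → hf < s + (k : Int) ∧ s + (k : Int) < hl) :
    (PySem.List.enumerate seg s).map (capFun hf hl) =
      seg.map (fun c => if c = 'h' then 'H' else c) := by
  have hcong : ∀ p ∈ PySem.List.enumerate seg s,
      capFun hf hl p = (fun c => if c = 'h' then 'H' else c) p.2 := by
    intro p hp
    rw [PySem.List.mem_enumerate_iff] at hp
    obtain ⟨k, hk, rfl⟩ := hp
    obtain ⟨h1, h2⟩ := h k hk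
    simp only [capFun]
    by_cases hc : seg[k] = 'h' <;> simp [hc, h1, h2]
  rw [List.map_congr_left hcong]
  rw [show (fun (a : Int × Char) => (fun c => if c = 'h' then 'H' else c) a.2) =
    (fun c => if c = 'h' then 'H' else c) ∘ (fun (a : Int × Char) => a.2) from rfl]
  rw [← List.map_map, PySem.List.map_snd_enumerate]

-- A's slicing construction computes exactly the pointwise capitalization capFun
theorem replace_hH (l : List Char) :
    PySem.Chars.replace l ['h'] ['H'] = l.map (fun c => if c = 'h' then 'H' else c) := by
  rw [replace_single]
  rw [show (fun x => if x = 'h' then (['H'] : List Char) else [x]) =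
      fun x => [if x = 'h' then 'H' else x] by funext x; split <;> rfl]
  exact (List.map_eq_flatMap).symm

-- A's slicing construction computes exactly the pointwise capitalization capFun
theorem capEq (cs : List Char) :
    (if PySem.Chars.find cs ['h'] = PySem.Chars.rfind cs ['h'] then cs
     else
       PySem.Chars.slice cs none (some (PySem.Chars.findFrom cs ['h'] (PySem.Chars.find cs ['h'] + 1))) ++
       (PySem.Chars.replace
         (PySem.Chars.slice cs (some (PySem.Chars.findFrom cs ['h'] (PySem.Chars.find cs ['h'] + 1)))
           (some (PySem.Chars.rfind cs ['h']))) ['h'] ['H'] ++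
       PySem.Chars.slice cs (some (PySem.Chars.rfind cs ['h'])) none)) =
    (PySem.List.enumerate cs).map
      (capFun (PySem.Chars.find cs ['h']) (PySem.Chars.rfind cs ['h'])) := by
  by_cases heq : PySem.Chars.find cs ['h'] = PySem.Chars.rfind cs ['h']
  · -- hf = hl: the interval (hf, hl) is empty, so capFun is the identity
    rw [if_pos heq, heq]
    symm
    apply cap_map_id
    intro k hk _
    omega
  · rw [if_neg heq]
    -- hf ≠ hl forces at least two 'h'; decompose cs at the first two and the last 'h'
    have hmem : 'h' ∈ cs := by
      by_contra hn
      exact heq (by rw [find_not _ _ hn, rfind_not _ _ hn])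
    obtain ⟨u, v, rfl, hu⟩ := exists_first 'h' cs hmem
    have hfe : PySem.Chars.find (u ++ 'h' :: v) ['h'] = (u.length : Int) := find_mem 'h' u v hu
    have hv : 'h' ∈ v := by
      by_contra hn
      exact heq (by rw [hfe, rfind_mem 'h' u v hn])
    obtain ⟨p, z, rfl, hp⟩ := exists_first 'h' v hv
    have hdrop1 : (u ++ 'h' :: (p ++ 'h' :: z)).drop (u.length + 1) = p ++ 'h' :: z := by
      rw [show u ++ 'h' :: (p ++ 'h' :: z) = (u ++ ['h']) ++ (p ++ 'h' :: z) by simp]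
      exact List.drop_left' (by simp)
    have hff : PySem.Chars.findFrom (u ++ 'h' :: (p ++ 'h' :: z)) ['h']
        (PySem.Chars.find (u ++ 'h' :: (p ++ 'h' :: z)) ['h'] + 1) =
        ((u.length + 1 + p.length : Nat) : Int) := by
      rw [hfe]
      rw [show (u.length : Int) + 1 = ((u.length + 1 : Nat) : Int) by push_cast; ring]
      rw [PySem.Chars.findFrom_natCast _ _ _ (by simp only [List.length_append, List.length_cons]; omega)]
      rw [hdrop1, find_mem 'h' p z hp]
      rw [if_neg (by omega)]
      push_cast; ring
    by_cases hz : 'h' ∈ z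
    · -- at least three 'h': the middle slice is 'h' :: y with the last 'h' beyond it
      obtain ⟨y, w, rfl, hw⟩ := exists_last 'h' z hz
      have hle : PySem.Chars.rfind (u ++ 'h' :: (p ++ 'h' :: (y ++ 'h' :: w))) ['h'] =
          ((u.length + 1 + p.length + 1 + y.length : Nat) : Int) := by
        rw [show u ++ 'h' :: (p ++ 'h' :: (y ++ 'h' :: w)) =
          (u ++ 'h' :: (p ++ 'h' :: y)) ++ 'h' :: w by simp]
        rw [rfind_mem 'h' _ w hw]
        simp only [List.length_append, List.length_cons]
        push_cast; omega
      rw [hff, hle, hfe]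
      -- the three slices
      rw [PySem.Chars.slice, PySem.List.slice_to_natCast]
      rw [PySem.Chars.slice, PySem.List.slice_natCast]
      rw [PySem.Chars.slice, PySem.List.slice_from_natCast]
      have htake1 : (u ++ 'h' :: (p ++ 'h' :: (y ++ 'h' :: w))).take (u.length + 1 + p.length) =
          u ++ 'h' :: p := by
        rw [show u ++ 'h' :: (p ++ 'h' :: (y ++ 'h' :: w)) =
          (u ++ 'h' :: p) ++ ('h' :: (y ++ 'h' :: w)) by simp]
        exact List.take_left' (by simp; omega)
      have hdrop2 : (u ++ 'h' :: (p ++ 'h' :: (y ++ 'h' :: w))).drop (u.length + 1 + p.length) =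
          'h' :: (y ++ 'h' :: w) := by
        rw [show u ++ 'h' :: (p ++ 'h' :: (y ++ 'h' :: w)) =
          (u ++ 'h' :: p) ++ ('h' :: (y ++ 'h' :: w)) by simp]
        exact List.drop_left' (by simp; omega)
      have hdrop3 : (u ++ 'h' :: (p ++ 'h' :: (y ++ 'h' :: w))).drop
          (u.length + 1 + p.length + 1 + y.length) = 'h' :: w := by
        rw [show u ++ 'h' :: (p ++ 'h' :: (y ++ 'h' :: w)) =
          (u ++ 'h' :: (p ++ 'h' :: y)) ++ ('h' :: w) by simp]
        exact List.drop_left' (by simp; omega)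
      rw [htake1, hdrop2, hdrop3]
      have hsub : u.length + 1 + p.length + 1 + y.length - (u.length + 1 + p.length) =
          y.length + 1 := by omega
      rw [hsub]
      rw [show ('h' :: (y ++ 'h' :: w)).take (y.length + 1) = 'h' :: y by
        rw [show 'h' :: (y ++ 'h' :: w) = ('h' :: y) ++ ('h' :: w) by simp]
        exact List.take_left' (by simp)]
      rw [replace_hH]
      -- right-hand side, segment by segment
      rw [show u ++ 'h' :: (p ++ 'h' :: (y ++ 'h' :: w)) =
        u ++ ['h'] ++ p ++ ['h'] ++ y ++ ['h'] ++ w by simp]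
      simp only [PySem.List.enumerate_append, List.map_append]
      rw [cap_map_id _ _ _ u (by
        intro k hk hkc
        exact absurd (hkc ▸ List.getElem_mem hk) hu)]
      rw [cap_map_id _ _ _ p (by
        intro k hk hkc
        exact absurd (hkc ▸ List.getElem_mem hk) hp)]
      rw [cap_map_id _ _ _ w (by
        intro k hk hkc
        exact absurd (hkc ▸ List.getElem_mem hk) hw)]
      rw [cap_map_all _ _ _ y (by
        intro k hk
        simp only [List.length_append, List.length_cons, List.length_nil]
        constructor <;> (push_cast; omega))]
      rw [cap_map_id _ _ _ ['h'] (by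
        intro k hk _
        simp only [List.length_append, List.length_cons, List.length_nil] at hk ⊢
        push_cast; omega)]
      rw [cap_map_all _ _ _ ['h'] (by
        intro k hk
        simp only [List.length_append, List.length_cons, List.length_nil] at hk ⊢
        constructor <;> (push_cast; omega))]
      rw [cap_map_id _ _ _ ['h'] (by
        intro k hk _
        simp only [List.length_append, List.length_cons, List.length_nil] at hk ⊢
        push_cast; omega)]
      simp
    · -- exactly two 'h': the middle slice is empty and nothing is capitalized
      have hle : PySem.Chars.rfind (u ++ 'h' :: (p ++ 'h' :: z)) ['h'] =
          ((u.length + 1 + p.length : Nat) : Int) := by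
        rw [show u ++ 'h' :: (p ++ 'h' :: z) = (u ++ 'h' :: p) ++ 'h' :: z by simp]
        rw [rfind_mem 'h' _ z hz]
        simp only [List.length_append, List.length_cons]
        push_cast; omega
      rw [hff, hle, hfe]
      rw [PySem.Chars.slice, PySem.List.slice_to_natCast]
      rw [PySem.Chars.slice, PySem.List.slice_natCast]
      rw [PySem.Chars.slice, PySem.List.slice_from_natCast]
      have htake1 : (u ++ 'h' :: (p ++ 'h' :: z)).take (u.length + 1 + p.length) =
          u ++ 'h' :: p := by
        rw [show u ++ 'h' :: (p ++ 'h' :: z) = (u ++ 'h' :: p) ++ ('h' :: z) by simp]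
        exact List.take_left' (by simp; omega)
      have hdrop2 : (u ++ 'h' :: (p ++ 'h' :: z)).drop (u.length + 1 + p.length) =
          'h' :: z := by
        rw [show u ++ 'h' :: (p ++ 'h' :: z) = (u ++ 'h' :: p) ++ ('h' :: z) by simp]
        exact List.drop_left' (by simp; omega)
      rw [htake1, hdrop2, Nat.sub_self, List.take_zero, replace_hH]
      rw [show u ++ 'h' :: (p ++ 'h' :: z) = u ++ ['h'] ++ p ++ ['h'] ++ z by simp]
      simp only [PySem.List.enumerate_append, List.map_append]
      rw [cap_map_id _ _ _ u (by
        intro k hk hkc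
        exact absurd (hkc ▸ List.getElem_mem hk) hu)]
      rw [cap_map_id _ _ _ p (by
        intro k hk hkc
        exact absurd (hkc ▸ List.getElem_mem hk) hp)]
      rw [cap_map_id _ _ _ z (by
        intro k hk hkc
        exact absurd (hkc ▸ List.getElem_mem hk) hz)]
      rw [cap_map_id _ _ _ ['h'] (by
        intro k hk _
        simp only [List.length_append, List.length_cons, List.length_nil] at hk ⊢
        push_cast; omega)]
      rw [cap_map_id _ _ _ ['h'] (by
        intro k hk _
        simp only [List.length_append, List.length_cons, List.length_nil] at hk ⊢
        push_cast; omega)]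
      simp

theorem flatMap_filter_eq {α β : Type} (l : List α) (p : α → Bool) (f : α → List β) :
    (l.filter p).flatMap f = l.flatMap (fun x => if p x then f x else []) := by
  induction l with
  | nil => rfl
  | cons x t ih =>
    by_cases hx : p x <;> simp [hx, ih]

theorem main_eq (a : String) : solution a = solution_alt a := by
  apply String.toList_inj.mp
  unfold solution solution_alt
  simp only [PySem.Str.toList_replace, PySem.Str.find_eq, PySem.Str.rfind_eq,
    PySem.Str.findFrom_eq, PySem.Str.toList_join, PySem.Str.len_eq,
    String.toList_ofList, apply_ite String.toList,
    show "h".toList = ['h'] from rfl, show "1".toList = ['1'] from rfl,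
    show "one".toList = ['o','n','e'] from rfl,
    show "".toList = [] from rfl]
  simp only [List.map_cons, List.map_nil, PySem.Str.toList_slice, PySem.Str.toList_replace,
    PySem.Chars.join_cons_cons, PySem.Chars.join_singleton, List.append_nil,
    show "h".toList = ['h'] from rfl, show "H".toList = ['H'] from rfl]
  rw [capEq a.toList]
  rw [replace_single, List.flatMap_map, flatMap_filter_eq]
  rw [show (fun acc (p : Int × Char) =>
      if p.1 ≠ 0 ∧ PySem.Int.mod p.1 3 = 0 then acc
      else acc ++
        if (if p.2 = 'h' ∧ PySem.Chars.find a.toList ['h'] < p.1 ∧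
              p.1 < PySem.Chars.rfind a.toList ['h'] then 'H' else p.2) = '1'
        then ['o', 'n', 'e']
        else [if p.2 = 'h' ∧ PySem.Chars.find a.toList ['h'] < p.1 ∧
              p.1 < PySem.Chars.rfind a.toList ['h'] then 'H' else p.2]) =
    (fun acc (p : Int × Char) => acc ++
      (fun (p : Int × Char) =>
        if p.1 ≠ 0 ∧ PySem.Int.mod p.1 3 = 0 then []
        else
          if (if p.2 = 'h' ∧ PySem.Chars.find a.toList ['h'] < p.1 ∧
                p.1 < PySem.Chars.rfind a.toList ['h'] then 'H' else p.2) = '1'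
          then ['o', 'n', 'e']
          else [if p.2 = 'h' ∧ PySem.Chars.find a.toList ['h'] < p.1 ∧
                p.1 < PySem.Chars.rfind a.toList ['h'] then 'H' else p.2]) p) by
    funext acc p
    by_cases hsk : p.1 ≠ 0 ∧ PySem.Int.mod p.1 3 = 0
    · simp only [if_pos hsk, List.append_nil]
    · simp only [if_neg hsk]]
  rw [PySem.List.foldl_append_eq_flatMap, List.nil_append]
  conv_rhs => rw [PySem.List.enumerate_eq_map_pyRange a.toList ' ', List.flatMap_map]
  simp only [List.length_map, PySem.List.length_enumerate, PySem.List.len]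
  apply List.flatMap_congr
  intro j hj
  rw [PySem.List.mem_pyRange_one] at hj
  have hget : PySem.List.pyGetD
      ((PySem.List.enumerate a.toList).map
        (capFun (PySem.Chars.find a.toList ['h']) (PySem.Chars.rfind a.toList ['h']))) j ' ' =
      capFun (PySem.Chars.find a.toList ['h']) (PySem.Chars.rfind a.toList ['h'])
        (j, PySem.List.pyGetD a.toList j ' ') := by
    have hlt : j.toNat < a.toList.length := by omega
    rw [PySem.List.pyGetD_eq_getElem _ ' ' hj.1 (by
      simp only [List.length_map, PySem.List.length_enumerate]; omega)]
    rw [PySem.List.pyGetD_eq_getElem _ ' ' hj.1 (by omega)]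
    rw [List.getElem_map, PySem.List.getElem_enumerate]
    rw [zero_add, Int.toNat_of_nonneg hj.1]
  rw [hget]
  simp only [capFun]
  by_cases hj0 : j = 0 <;> by_cases hm : PySem.Int.mod j 3 = 0 <;>
    simp [hj0]

-- ===== VERDICT (by name: the statement is the Claim_ definition above) =====
theorem solution_spec : Claim_equal_solution := by
  intro a _
  unfold Spec_solution
  exact main_eq a
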